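-- pv_equiv track=rewrite | github.com/ydraxx/xml-exception-tracer | ui_components.py | extract_filter_values
-- ===== SOURCE A (Python) =====
-- from collections import defaultdict
--
-- def extract_filter_values(conditions):
--     """Extract all possible filter values from conditions."""
--     filter_values = defaultdict(set)
--     for condition in conditions:
--         for part in condition.split(','):
--             if "==" in part:
--                 name, value = part.split("==")
--                 filter_values[name.strip()].add(value.strip().replace(";", ""))
--     return {k: sorted(v) for k, v in filter_values.items()}
-- ===== SOURCE B (Python) =====
-- def extract_filter_values(conditions):
--     """Extract all possible filter values from conditions."""
--     parts = [part for condition in conditions for part in condition.split(',')]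
--     pairs = [(part.split("==")[0].strip(),
--               part.split("==")[1].strip().replace(";", ""))
--              for part in parts if "==" in part]
--     result = {}
--     while pairs:
--         name = pairs[0][0]
--         result[name] = sorted({v for n, v in pairs if n == name})
--         pairs = [p for p in pairs if p[0] != name]
--     return result
-- ===== Notes on version B (the rewrite author's own statement) =====
-- stated objective: alternative
-- what changed: B flattens all conditions into one flat list of (name, cleaned value) pairs in two staged comprehensions, then groups with a worklist loop that repeatedly emits the first remaining name with its sorted value set and filters that name out, instead of A's incremental defaultdict(set) updated inside nested loops.
import Mathlib
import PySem

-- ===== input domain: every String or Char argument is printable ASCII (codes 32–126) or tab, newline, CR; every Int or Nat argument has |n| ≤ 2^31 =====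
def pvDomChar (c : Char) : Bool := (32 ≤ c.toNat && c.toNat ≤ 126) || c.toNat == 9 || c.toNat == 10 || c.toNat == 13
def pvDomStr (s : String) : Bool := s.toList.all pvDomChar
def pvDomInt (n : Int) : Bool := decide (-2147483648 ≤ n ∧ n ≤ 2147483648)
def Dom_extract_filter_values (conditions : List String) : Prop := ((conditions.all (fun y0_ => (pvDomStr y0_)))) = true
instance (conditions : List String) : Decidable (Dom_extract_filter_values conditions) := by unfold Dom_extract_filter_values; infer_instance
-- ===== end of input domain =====

-- B first flattens everything into one list of (name, cleaned value) pairs in two staged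
-- comprehensions, then groups by repeatedly taking the first remaining name and filtering
-- it out of the worklist, instead of A's incremental defaultdict(set) updated inside
-- nested loops; equal return value on Pre_ (where Python A does not raise).

-- ===== PORT A =====
def extract_filter_values (conditions : List String) : List (String × List String) :=
  let filter_values : PySem.Dict String (PySem.Set String) :=
    conditions.foldl (fun d condition =>
      ((PySem.Str.split? condition ",").getD []).foldl (fun d part =>
        if PySem.Str.isIn "==" part then
          match (PySem.Str.split? part "==").getD [] with
          | [name, value] =>
              d.modify (PySem.Str.strip name) PySem.Set.empty
                (fun s => PySem.Set.add s (PySem.Str.replace (PySem.Str.strip value) ";" ""))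
          | _ => d   -- Python raises ValueError (unpacking) here; excluded by Pre_
        else d) d) PySem.Dict.empty
  filter_values.items.map (fun kv => (kv.1, PySem.List.sorted kv.2 (fun x => x) false))

-- ===== PORT B =====
-- B-side helper: the grouping while-loop of Source B (pairs nonempty → emit the first name
-- with the sorted set of its values, drop all its pairs, continue on the rest)
def pvGroupPairs : List (String × String) → List (String × List String)
  | [] => []
  | p :: rest =>
      (p.1, PySem.List.sorted
          (PySem.Set.ofList ((p :: rest).filterMap
            (fun q => if q.1 == p.1 then some q.2 else none)))
          (fun x => x) false)
        :: pvGroupPairs (rest.filter (fun q => q.1 != p.1))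
termination_by ps => ps.length
decreasing_by
  simp only [List.length_unattach]
  exact Nat.lt_succ_of_le (le_trans (List.length_filter_le _ _) (by simp))

def extract_filter_values_alt (conditions : List String) : List (String × List String) :=
  let parts : List String :=
    conditions.flatMap (fun condition => (PySem.Str.split? condition ",").getD [])
  let pairs : List (String × String) :=
    parts.filterMap (fun part =>
      if PySem.Str.isIn "==" part then
        -- part.split("==")[0] / [1]: in range whenever "==" ∈ part, so Python never raises here
        some (PySem.Str.strip (PySem.List.pyGetD ((PySem.Str.split? part "==").getD []) 0 ""),
              PySem.Str.replace
                (PySem.Str.strip (PySem.List.pyGetD ((PySem.Str.split? part "==").getD []) 1 ""))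
                ";" "")
      else none)
  pvGroupPairs pairs

-- ===== PRECONDITION & SPEC =====
-- Pre_ excludes exactly the inputs where Python A raises ValueError: a comma-part
-- containing "==" more than once makes 'name, value = part.split("==")' fail to unpack.
def Pre_extract_filter_values (conditions : List String) : Prop :=
  (conditions.all (fun c => ((PySem.Str.split? c ",").getD []).all (fun p =>
    !(PySem.Str.isIn "==" p) || ((PySem.Str.split? p "==").getD []).length == 2))) = true
instance (conditions : List String) : Decidable (Pre_extract_filter_values conditions) := by
  unfold Pre_extract_filter_values; infer_instance
def pvWitness_extract_filter_values : List String := ["a==1,b == 2;", " a ==3", "x, y"]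

def Spec_extract_filter_values (conditions : List String) (out : List (String × List String)) : Prop := out = extract_filter_values_alt conditions
instance (conditions : List String) (out : List (String × List String)) : Decidable (Spec_extract_filter_values conditions out) := by unfold Spec_extract_filter_values; infer_instance

-- ===== CLAIM (what is proved, stated in full; the proofs are below) =====
def Claim_equal_extract_filter_values : Prop := ∀ (conditions : List String), Dom_extract_filter_values conditions → Pre_extract_filter_values conditions → Spec_extract_filter_values conditions (extract_filter_values conditions)

-- ===== LEMMAS AND PROOFS =====

-- B's per-part extraction, as a named function
def pvPartPair (part : String) : Option (String × String) :=
  if PySem.Str.isIn "==" part then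
    some (PySem.Str.strip (PySem.List.pyGetD ((PySem.Str.split? part "==").getD []) 0 ""),
          PySem.Str.replace
            (PySem.Str.strip (PySem.List.pyGetD ((PySem.Str.split? part "==").getD []) 1 ""))
            ";" "")
  else none

-- A's dict update step, as a function of the extracted pair
def pvStep (d : PySem.Dict String (PySem.Set String)) (p : String × String) :
    PySem.Dict String (PySem.Set String) :=
  d.modify p.1 PySem.Set.empty (fun s => PySem.Set.add s p.2)

-- under Pre_'s per-part condition, A's inner loop is 'fold pvStep over the extracted pairs'
lemma foldl_parts_eq (parts : List String)
    (h : ∀ p ∈ parts, PySem.Str.isIn "==" p = false ∨ ((PySem.Str.split? p "==").getD []).length = 2)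
    (d : PySem.Dict String (PySem.Set String)) :
    parts.foldl (fun d part =>
      if PySem.Str.isIn "==" part then
        match (PySem.Str.split? part "==").getD [] with
        | [name, value] =>
            d.modify (PySem.Str.strip name) PySem.Set.empty
              (fun s => PySem.Set.add s (PySem.Str.replace (PySem.Str.strip value) ";" ""))
        | _ => d
        else d) d
    = (parts.filterMap pvPartPair).foldl pvStep d := by
  induction parts generalizing d with
  | nil => rfl
  | cons p t ih =>
    have hp := h p (by simp)
    have ht : ∀ q ∈ t, PySem.Str.isIn "==" q = false ∨ ((PySem.Str.split? q "==").getD []).length = 2 :=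
      fun q hq => h q (by simp [hq])
    simp only [List.foldl_cons, List.filterMap_cons]
    rcases hp with hp | hp
    · have hp' : PySem.Chars.isIn ['=', '='] p.toList = false := by simpa using hp
      simpa [pvPartPair, hp'] using ih ht d
    · rcases hsp : (PySem.Str.split? p "==").getD [] with _ | ⟨n, _ | ⟨v, _ | _⟩⟩ <;>
        rw [hsp] at hp <;> simp at hp
      by_cases hin : PySem.Chars.isIn ['=', '='] p.toList = true <;>
        simpa [pvPartPair, hin, hsp, pvStep, PySem.List.pyGetD] using ih ht _

-- the dict value at key n after folding pvStep is Set.update with the filtered values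
lemma getD_foldl_pvStep (ps : List (String × String)) (d : PySem.Dict String (PySem.Set String))
    (n : String) :
    ((ps.foldl pvStep d).getD n PySem.Set.empty)
    = PySem.Set.update (d.getD n PySem.Set.empty)
        (ps.filterMap (fun nv => if nv.1 == n then some nv.2 else none)) := by
  induction ps generalizing d with
  | nil => rfl
  | cons p t ih =>
    simp only [List.foldl_cons, List.filterMap_cons, ih]
    by_cases hk : n = p.1
    · subst hk
      simp [pvStep, PySem.Set.update]
    · simp [pvStep, PySem.Dict.getD_modify, hk, beq_iff_eq, Ne.symm hk]

-- the items of the fold of pvStep from the empty dict: names in first-occurrence order,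
-- each with the set of its values in first-occurrence order
lemma items_foldl_pvStep (ps : List (String × String)) :
    (ps.foldl pvStep PySem.Dict.empty).items
    = (PySem.List.dedup (ps.map Prod.fst)).map (fun n =>
        (n, PySem.Set.ofList (ps.filterMap (fun nv => if nv.1 == n then some nv.2 else none)))) := by
  have hkeys : (ps.foldl pvStep PySem.Dict.empty).keys
      = PySem.Set.update (PySem.Dict.empty : PySem.Dict String (PySem.Set String)).keys
          (ps.map Prod.fst) := by
    simpa [pvStep] using
      PySem.Dict.keys_foldl_modify_key ps Prod.fst PySem.Set.empty
        (fun _ p => fun s => PySem.Set.add s p.2) PySem.Dict.empty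
  have hnd : (ps.foldl pvStep PySem.Dict.empty).keys.Nodup := by
    simpa [pvStep] using
      PySem.Dict.nodup_keys_foldl_modify_key ps Prod.fst PySem.Set.empty
        (fun _ p => fun s => PySem.Set.add s p.2) PySem.Dict.empty
        (by simp [PySem.Dict.keys_empty])
  rw [PySem.Dict.items_eq_map_keys _ hnd PySem.Set.empty, hkeys]
  have hupd : PySem.Set.update (PySem.Dict.empty : PySem.Dict String (PySem.Set String)).keys
      (ps.map Prod.fst) = PySem.List.dedup (ps.map Prod.fst) := by
    simp [PySem.Set.update, PySem.Dict.keys_empty, PySem.List.dedup_eq_ofList, PySem.Set.ofList]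
  rw [hupd]
  refine List.map_congr_left fun n _ => ?_
  rw [getD_foldl_pvStep]
  simp [PySem.Dict.getD_empty, PySem.Set.update, PySem.Set.ofList]

-- filtering out another name does not change a name's extracted values
lemma filterMap_filter_ne (ps : List (String × String)) (m n : String) (hmn : n ≠ m) :
    (ps.filter (fun q => q.1 != m)).filterMap
        (fun q => if q.1 == n then some q.2 else none)
    = ps.filterMap (fun q => if q.1 == n then some q.2 else none) := by
  induction ps with
  | nil => rfl
  | cons p t ih =>
    by_cases hpm : p.1 = m
    · have hf : (p :: t).filter (fun q => q.1 != m) = t.filter (fun q => q.1 != m) := by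
        simp [hpm]
      rw [hf, ih, List.filterMap_cons]
      simp [hpm, Ne.symm hmn]
    · have hf : (p :: t).filter (fun q => q.1 != m) = p :: t.filter (fun q => q.1 != m) := by
        simp [hpm]
      rw [hf, List.filterMap_cons, List.filterMap_cons, ih]

-- adding to a set an element it already contains never changes it, so later duplicates
-- of a contained element may be filtered out of an update
lemma set_update_filter_mem (s : PySem.Set String) (x : String) (hx : x ∈ s)
    (ys : List String) :
    PySem.Set.update s ys = PySem.Set.update s (ys.filter (fun y => y != x)) := by
  induction ys generalizing s with
  | nil => rfl
  | cons y t ih =>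
    simp only [PySem.Set.update, List.foldl_cons, List.filter_cons] at ih ⊢
    by_cases hyx : y = x
    · subst hyx
      have hadd : PySem.Set.add s y = s := by simp [PySem.Set.add, hx]
      simpa [hadd] using ih s hx
    · have hyx' : (y != x) = true := by simp [bne, hyx]
      have hmem : x ∈ PySem.Set.add s y := by
        unfold PySem.Set.add; split <;> simp [hx]
      simpa [hyx'] using ih _ hmem

-- a head no later element equals stays a head through an update
lemma set_update_cons_notmem (x : String) (t : PySem.Set String) (ys : List String)
    (h : ∀ y ∈ ys, (y == x) = false) :
    PySem.Set.update (x :: t) ys = x :: PySem.Set.update t ys := by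
  induction ys generalizing t with
  | nil => rfl
  | cons y s ih =>
    have hy : (y == x) = false := h y (by simp)
    have hne : y ≠ x := beq_eq_false_iff_ne.1 hy
    have hadd : PySem.Set.add (x :: t) y = x :: PySem.Set.add t y := by
      by_cases hc : y ∈ t <;> simp [PySem.Set.add, hne, hc]
    simp only [PySem.Set.update, List.foldl_cons] at ih ⊢
    rw [hadd, ih _ (fun z hz => h z (by simp [hz]))]

-- ordered dedup peels its head and drops the head's later duplicates
lemma dedup_cons_filter (x : String) (xs : List String) :
    PySem.List.dedup (x :: xs) = x :: PySem.List.dedup (xs.filter (fun y => y != x)) := by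
  have h1 : PySem.List.dedup (x :: xs) = PySem.Set.update [x] xs := by
    simp [PySem.List.dedup_eq_ofList, PySem.Set.ofList, PySem.Set.update, PySem.Set.add,
      PySem.Set.empty]
  rw [h1, set_update_filter_mem [x] x (by simp) xs,
    set_update_cons_notmem x [] _ (fun y hy => by
      have := List.of_mem_filter hy
      simpa using this)]
  simp [PySem.List.dedup_eq_ofList, PySem.Set.ofList, PySem.Set.update]

-- B's grouping loop computes, for each first-occurrence name, the sorted value set
lemma pvGroupPairs_eq (ps : List (String × String)) :
    pvGroupPairs ps
    = (PySem.List.dedup (ps.map Prod.fst)).map (fun n =>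
        (n, PySem.List.sorted
          (PySem.Set.ofList (ps.filterMap (fun q => if q.1 == n then some q.2 else none)))
          (fun x => x) false)) := by
  induction ps using pvGroupPairs.induct with
  | case1 => simp [pvGroupPairs]
  | case2 p rest ih =>
    rw [pvGroupPairs]
    rw [show (List.filter (fun x : {x // x ∈ rest} => (↑x : String × String).1 != p.1)
          rest.attach).unattach = List.filter (fun q => q.1 != p.1) rest from by
        rw [List.unattach_filter (g := fun q => q.1 != p.1) (hf := fun x h => rfl),
          List.unattach_attach]] at ih
    have hmap : (p :: rest).map Prod.fst = p.1 :: rest.map Prod.fst := rfl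
    rw [hmap, dedup_cons_filter, List.map_cons]
    have hfm : (rest.map Prod.fst).filter (fun y => y != p.1)
        = (rest.filter (fun q => q.1 != p.1)).map Prod.fst := by
      rw [List.filter_map]; rfl
    rw [hfm, ih]
    refine congrArg _ (List.map_congr_left fun n hn => ?_)
    have hne : n ≠ p.1 := by
      have := (PySem.List.mem_dedup _ _).1 hn
      rcases List.mem_map.1 this with ⟨q, hq, rfl⟩
      simpa using (List.of_mem_filter hq)
    rw [filterMap_filter_ne _ p.1 n hne, List.filterMap_cons]
    have : (if p.1 == n then some p.2 else none) = none := by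
      simp [Ne.symm hne]
    simp only [this]

-- ===== VERDICT (by name: the statement is the Claim_ definition above) =====
theorem extract_filter_values_spec : Claim_equal_extract_filter_values := by
  intro conditions _ hpre
  unfold Spec_extract_filter_values extract_filter_values extract_filter_values_alt
  unfold Pre_extract_filter_values at hpre
  simp only [List.all_eq_true, Bool.or_eq_true, Bool.not_eq_true', beq_iff_eq] at hpre
  have h1 : conditions.foldl (fun d condition =>
      ((PySem.Str.split? condition ",").getD []).foldl (fun d part =>
        if PySem.Str.isIn "==" part then
          match (PySem.Str.split? part "==").getD [] with
          | [name, value] =>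
              d.modify (PySem.Str.strip name) PySem.Set.empty
                (fun s => PySem.Set.add s (PySem.Str.replace (PySem.Str.strip value) ";" ""))
          | _ => d
          else d) d) PySem.Dict.empty
      = ((conditions.flatMap (fun c => ((PySem.Str.split? c ",").getD []))).filterMap pvPartPair).foldl
          pvStep PySem.Dict.empty := by
    rw [List.filterMap_flatMap, List.foldl_flatMap]
    refine PySem.List.foldl_congr_mem conditions _ _ _ (fun d c hc => ?_)
    exact foldl_parts_eq _ (fun p hp => hpre c hc p hp) d
  rw [h1]
  dsimp only
  rw [items_foldl_pvStep, pvGroupPairs_eq]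
  simp only [List.map_map, Function.comp_def]
  rfl
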